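-- pv_equiv track=rewrite | github.com/markbrownsword/puncpy | puncpy/apostrophe.py | __match_apostrophe_pairs
-- ===== SOURCE A (Python) =====
-- def __match_apostrophe_pairs(tagged_text):
--     apostrophe_pairs = []
--     apostrophe_token = "'s"
--
--     for current_index, current_token in enumerate(tagged_text):
--         if current_token[0] != apostrophe_token:
--             continue
--
--         current = current_token
--         previous = None
--         after = None
--
--         # Find token before apostrophe_token
--         for previous_index, previous_token in enumerate(tagged_text):
--             if previous_index == current_index - 1:
--                 previous = previous_token
--                 break
--
--         # Find token after apostrophe_token
--         for after_index, after_token in enumerate(tagged_text):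
--             if after_index == current_index + 1:
--                 after = after_token
--                 break
--
--         apostrophe_pairs.append([previous, current, after])
--
--     return apostrophe_pairs
-- ===== SOURCE B (Python) =====
-- def __match_apostrophe_pairs(tagged_text):
--     n = len(tagged_text)
--     return [[tagged_text[i - 1] if i > 0 else None,
--              tok,
--              tagged_text[i + 1] if i + 1 < n else None]
--             for i, tok in enumerate(tagged_text)
--             if tok and tok[0] == "'s"]
-- ===== Notes on version B (the rewrite author's own statement) =====
-- stated objective: simpler
-- what changed: Replaced the two inner enumerate-rescans per apostrophe token by direct neighbour index access with bounds checks in a single comprehension pass.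
import Mathlib
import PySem

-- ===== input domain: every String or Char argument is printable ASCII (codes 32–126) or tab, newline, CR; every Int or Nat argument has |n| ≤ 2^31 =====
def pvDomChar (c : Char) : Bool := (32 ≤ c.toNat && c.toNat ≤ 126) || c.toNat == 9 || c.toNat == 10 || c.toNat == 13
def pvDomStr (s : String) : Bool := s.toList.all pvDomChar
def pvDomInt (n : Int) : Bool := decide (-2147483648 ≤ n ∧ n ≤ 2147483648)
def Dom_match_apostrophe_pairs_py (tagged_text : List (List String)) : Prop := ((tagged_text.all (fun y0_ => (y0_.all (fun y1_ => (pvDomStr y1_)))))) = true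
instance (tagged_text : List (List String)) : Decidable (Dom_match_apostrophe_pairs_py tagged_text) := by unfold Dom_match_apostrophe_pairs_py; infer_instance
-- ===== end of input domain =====

-- B replaces A's two inner enumerate-rescans per apostrophe token by direct neighbour
-- index access with bounds checks, in one comprehension pass (objective: simpler).


-- ===== PORT A =====
-- A's inner loops: scan the whole list with a running index until it equals the target.
def pyScanAt (xs : List (List String)) (i : Nat) (target : Int) : Option (List String) :=
  match xs with
  | [] => none
  | t :: rest => if (i : Int) = target then some t else pyScanAt rest (i + 1) target

def matchAGo (xs : List (List String)) (all : List (List String)) (i : Nat) :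
    List (List (Option (List String))) :=
  match xs with
  | [] => []
  | t :: rest =>
    if PySem.List.pyGet? t 0 = some "'s" then
      [pyScanAt all 0 ((i : Int) - 1), some t, pyScanAt all 0 ((i : Int) + 1)]
        :: matchAGo rest all (i + 1)
    else matchAGo rest all (i + 1)

def match_apostrophe_pairs_py (tagged_text : List (List String)) : List (List (Option (List String))) :=
  matchAGo tagged_text tagged_text 0

-- ===== PORT B =====
def matchBGo (xs : List (List String)) (all : List (List String)) (i : Nat) :
    List (List (Option (List String))) :=
  match xs with
  | [] => []
  | t :: rest =>
    if t.head? = some "'s" then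
      [if i > 0 then all[i - 1]? else none, some t,
       if i + 1 < all.length then all[i + 1]? else none]
        :: matchBGo rest all (i + 1)
    else matchBGo rest all (i + 1)

def match_apostrophe_pairs_py_alt (tagged_text : List (List String)) : List (List (Option (List String))) :=
  matchBGo tagged_text tagged_text 0

-- ===== PRECONDITION & SPEC =====
-- A raises IndexError (current_token[0]) whenever some inner token list is empty; Pre_ excludes exactly those.
def Pre_match_apostrophe_pairs_py (tagged_text : List (List String)) : Prop :=
  ∀ t ∈ tagged_text, t ≠ []
instance (tagged_text : List (List String)) : Decidable (Pre_match_apostrophe_pairs_py tagged_text) := by unfold Pre_match_apostrophe_pairs_py; infer_instance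
def pvWitness_match_apostrophe_pairs_py : List (List String) := [["the"], ["'s", "POS"], ["cat"]]

def Spec_match_apostrophe_pairs_py (tagged_text : List (List String)) (out : List (List (Option (List String)))) : Prop := out = match_apostrophe_pairs_py_alt tagged_text
instance (tagged_text : List (List String)) (out : List (List (Option (List String)))) : Decidable (Spec_match_apostrophe_pairs_py tagged_text out) := by unfold Spec_match_apostrophe_pairs_py; infer_instance

-- ===== CLAIM (what is proved, stated in full; the proofs are below) =====
def Claim_equal_match_apostrophe_pairs_py : Prop := ∀ (tagged_text : List (List String)), Dom_match_apostrophe_pairs_py tagged_text → Pre_match_apostrophe_pairs_py tagged_text → Spec_match_apostrophe_pairs_py tagged_text (match_apostrophe_pairs_py tagged_text)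
-- ===== LEMMAS AND PROOFS =====
lemma pyScanAt_eq (xs : List (List String)) (k : Nat) (t : Int) :
    pyScanAt xs k t = if (k : Int) ≤ t then xs[(t - k).toNat]? else none := by
  induction xs generalizing k with
  | nil => simp [pyScanAt]
  | cons x rest ih =>
    simp only [pyScanAt, ih (k + 1)]
    push_cast
    by_cases h1 : (k : Int) = t
    · subst h1; simp
    · by_cases h2 : (k : Int) ≤ t
      · rw [if_neg h1, if_pos (by omega), if_pos h2]
        have hz : (t - (k : Int)).toNat = (t - ((k : Int) + 1)).toNat + 1 := by omega
        rw [hz]; simp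
      · rw [if_neg h1, if_neg (by omega), if_neg h2]

lemma pyScanAt_prev (all : List (List String)) (i : Nat) :
    pyScanAt all 0 ((i : Int) - 1) = if i > 0 then all[i - 1]? else none := by
  rw [pyScanAt_eq]
  by_cases h : i > 0
  · rw [if_pos (by push_cast; omega), if_pos h]
    congr 1; omega
  · rw [if_neg (by push_cast; omega), if_neg h]

lemma pyScanAt_next (all : List (List String)) (i : Nat) :
    pyScanAt all 0 ((i : Int) + 1) = if i + 1 < all.length then all[i + 1]? else none := by
  rw [pyScanAt_eq, if_pos (by push_cast; omega)]
  have hz : (((i : Int) + 1) - ((0 : Nat) : Int)).toNat = i + 1 := by omega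
  rw [hz]
  by_cases h : i + 1 < all.length
  · rw [if_pos h]
  · rw [if_neg h]; simp; omega

lemma head?_of_pyGet (t : List String) (ht : t ≠ []) :
    (PySem.List.pyGet? t 0 = some "'s") ↔ (t.head? = some "'s") := by
  cases t with
  | nil => simp at ht
  | cons a r => simp [PySem.List.pyGet?, PySem.List.pyIdx?]

lemma matchGo_eq (xs all : List (List String)) (i : Nat)
    (h : ∀ t ∈ xs, t ≠ []) :
    matchAGo xs all i = matchBGo xs all i := by
  induction xs generalizing i with
  | nil => rfl
  | cons t rest ih =>
    have ht : t ≠ [] := h t (by simp)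
    have hrest : ∀ u ∈ rest, u ≠ [] := fun u hu => h u (by simp [hu])
    simp only [matchAGo, matchBGo, head?_of_pyGet t ht, pyScanAt_prev, pyScanAt_next,
      ih (i + 1) hrest]

-- ===== VERDICT (by name: the statement is the Claim_ definition above) =====
theorem match_apostrophe_pairs_py_spec : Claim_equal_match_apostrophe_pairs_py := by
  intro tt _ hpre
  unfold Spec_match_apostrophe_pairs_py match_apostrophe_pairs_py match_apostrophe_pairs_py_alt
  exact matchGo_eq tt tt 0 hpre
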